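-- pv_equiv track=rewrite | github.com/j3gb3rt/probecode | parse_test.py | reformat_string
-- ===== SOURCE A (Python) =====
-- def reformat_string(str):
--     comma_count = 0
--     ret = ""
--     for i in str:
--         if comma_count < 3 or comma_count == 4:
--             ret += i
--         if i == ',':
--             comma_count += 1
--     return ret[:-1]
-- ===== SOURCE B (Python) =====
-- def reformat_string(str):
--     def go(s, k):
--         if k >= 5:
--             return ''
--         head, sep, rest = s.partition(',')
--         if not sep:
--             return '' if k == 3 else s
--         if k == 3:
--             return go(rest, 4)
--         return head + ',' + go(rest, k + 1)
--     return go(str, 0)[:-1]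
-- ===== Notes on version B (the rewrite author's own statement) =====
-- stated objective: alternative
-- what changed: A scans character by character keeping a running comma counter over the whole string; B consumes the string field by field with str.partition in an at-most-5-step recursion (skipping field 3 and stopping after field 4, so the tail past the 5th comma is never scanned) and drops the last character once at the end.
import Mathlib
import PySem

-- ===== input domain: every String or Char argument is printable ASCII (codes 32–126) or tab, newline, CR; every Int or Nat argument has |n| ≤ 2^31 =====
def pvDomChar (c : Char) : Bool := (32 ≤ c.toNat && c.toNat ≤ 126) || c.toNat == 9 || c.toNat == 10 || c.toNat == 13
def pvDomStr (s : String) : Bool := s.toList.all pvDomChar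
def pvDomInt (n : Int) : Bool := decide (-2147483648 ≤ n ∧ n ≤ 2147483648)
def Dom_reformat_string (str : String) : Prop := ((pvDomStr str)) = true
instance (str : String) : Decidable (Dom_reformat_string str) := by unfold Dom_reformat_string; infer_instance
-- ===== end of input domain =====

-- B replaces A's char-by-char comma-counting loop by a per-field recursion via str.partition; objective: alternative decomposition, same cost.

-- ===== PORT A =====
-- the loop body: state (comma_count, ret)
def pvStepA (st : Int × List Char) (i : Char) : Int × List Char :=
  let ret := if st.1 < 3 ∨ st.1 = 4 then st.2 ++ [i] else st.2
  let cc := if i = ',' then st.1 + 1 else st.1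
  (cc, ret)

def reformat_string (str : String) : String :=
  String.ofList (PySem.Chars.slice (str.toList.foldl pvStepA (0, [])).2 none (some (-1)))   -- ret[:-1]

-- ===== PORT B =====
-- exact hand port of s.partition(',') for the single-character separator:
-- (text before the first ',', the ',' if present, the rest)
def pvPartitionComma (s : List Char) : List Char × List Char × List Char :=
  match s.dropWhile (· ≠ ',') with
  | [] => (s, [], [])
  | _ :: r => (s.takeWhile (· ≠ ','), [','], r)

-- termination fact for pvGoB: when a ',' is found the rest is strictly shorter
theorem pvPartRest_lt (s : List Char) (h : (pvPartitionComma s).2.1 ≠ []) :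
    (pvPartitionComma s).2.2.length < s.length := by
  unfold pvPartitionComma at h ⊢
  cases hd : s.dropWhile (· ≠ ',') with
  | nil => rw [hd] at h; simp at h
  | cons c r =>
    have h1 := List.length_dropWhile_le (p := (· ≠ ',')) (l := s)
    rw [hd] at h1
    simp at h1 ⊢
    omega

def pvGoB (s : List Char) (k : Nat) : List Char :=
  if 5 ≤ k then []
  else
    let p := pvPartitionComma s          -- head, sep, rest = s.partition(',')
    if p.2.1 = [] then (if k = 3 then [] else s)      -- if not sep
    else if k = 3 then pvGoB p.2.2 4
    else p.1 ++ ',' :: pvGoB p.2.2 (k + 1)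
termination_by s.length
decreasing_by all_goals exact pvPartRest_lt s (by assumption)

def reformat_string_alt (str : String) : String :=
  String.ofList (PySem.Chars.slice (pvGoB str.toList 0) none (some (-1)))   -- go(str, 0)[:-1]

-- ===== PRECONDITION & SPEC =====
def Spec_reformat_string (str : String) (out : String) : Prop := out = reformat_string_alt str
instance (str : String) (out : String) : Decidable (Spec_reformat_string str out) := by unfold Spec_reformat_string; infer_instance

-- ===== CLAIM (what is proved, stated in full; the proofs are below) =====
def Claim_equal_reformat_string : Prop := ∀ (str : String), Dom_reformat_string str → Spec_reformat_string str (reformat_string str)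

-- ===== LEMMAS AND PROOFS =====

-- A's loop with the ret-accumulator factored out
def pvLoopA : List Char → Int → List Char
  | [], _ => []
  | c :: t, k => (if k < 3 ∨ k = 4 then [c] else []) ++ pvLoopA t (if c = ',' then k + 1 else k)

theorem pvFoldA (l : List Char) : ∀ (k : Int) (r : List Char),
    (l.foldl pvStepA (k, r)).2 = r ++ pvLoopA l k := by
  induction l with
  | nil => intro k r; simp [pvLoopA]
  | cons c t ih =>
    intro k r
    simp only [List.foldl_cons, pvStepA, pvLoopA, ih]
    by_cases h : k < 3 ∨ k = 4 <;> simp [h]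

theorem pvLoopA_big (l : List Char) : ∀ (k : Int), 5 ≤ k → pvLoopA l k = [] := by
  induction l with
  | nil => intro k _; rfl
  | cons c t ih =>
    intro k hk
    have h1 : ¬ (k < 3 ∨ k = 4) := by omega
    simp only [pvLoopA, h1, if_false, List.nil_append]
    split <;> exact ih _ (by omega)

theorem pvLoopA_noComma (l : List Char) (hl : ',' ∉ l) (k : Int) :
    pvLoopA l k = if k < 3 ∨ k = 4 then l else [] := by
  induction l with
  | nil => simp [pvLoopA]
  | cons c t ih =>
    simp only [List.mem_cons, not_or] at hl
    have hc : ¬ (c = ',') := fun h => hl.1 h.symm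
    simp only [pvLoopA, if_neg hc, ih hl.2]
    by_cases h : k < 3 ∨ k = 4 <;> simp [h]

theorem pvLoopA_field (h : List Char) (hh : ',' ∉ h) (r : List Char) (k : Int) :
    pvLoopA (h ++ ',' :: r) k =
      (if k < 3 ∨ k = 4 then h ++ [','] else []) ++ pvLoopA r (k + 1) := by
  induction h with
  | nil => simp [pvLoopA]
  | cons c t ih =>
    simp only [List.mem_cons, not_or] at hh
    have hc : ¬ (c = ',') := fun h => hh.1 h.symm
    simp only [List.cons_append, pvLoopA, if_neg hc, ih hh.2]
    by_cases hk : k < 3 ∨ k = 4 <;> simp [hk]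

theorem pvMainAux : ∀ (n : Nat) (s : List Char), s.length ≤ n → ∀ (k : Nat),
    pvLoopA s (k : Int) = pvGoB s k := by
  intro n
  induction n with
  | zero =>
    intro s hs k
    have : s = [] := List.eq_nil_of_length_eq_zero (Nat.le_zero.mp hs)
    subst this
    rw [pvGoB]
    simp [pvPartitionComma, pvLoopA]
  | succ n ih =>
    intro s hs k
    rw [pvGoB]
    by_cases hk : 5 ≤ k
    · simp only [if_pos hk]
      exact pvLoopA_big s _ (by exact_mod_cast hk)
    · simp only [if_neg hk]
      cases hd : s.dropWhile (· ≠ ',') with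
      | nil =>
        have hnc : ',' ∉ s := by
          intro hm
          have := List.dropWhile_eq_nil_iff (p := (· ≠ ',')) (l := s) |>.mp hd ',' hm
          simp at this
        simp only [pvPartitionComma, hd]
        rw [pvLoopA_noComma s hnc]
        by_cases h3 : k = 3
        · subst h3; norm_num
        · have hcond : (k : Int) < 3 ∨ (k : Int) = 4 := by omega
          rw [if_pos hcond]
          rw [if_pos trivial, if_neg h3]
      | cons c r =>
        have hc : c = ',' := by
          have h0 := List.head_dropWhile_not (p := (· ≠ ',')) (l := s) (by rw [hd]; simp)
          simp only [hd] at h0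
          simpa using h0
        subst hc
        have hs' : s = s.takeWhile (· ≠ ',') ++ ',' :: r := by
          conv_lhs => rw [← List.takeWhile_append_dropWhile (p := (· ≠ ',')) (l := s)]
          rw [hd]
        have hhd : ',' ∉ s.takeWhile (· ≠ ',') := by
          intro hm
          have := List.mem_takeWhile_imp hm
          simp at this
        have hr : r.length ≤ n := by
          have h2 : s.length = (s.takeWhile (· ≠ ',')).length + r.length + 1 := by
            conv_lhs => rw [hs']
            simp
            omega
          omega
        simp only [pvPartitionComma, hd]
        conv_lhs => rw [hs']
        rw [pvLoopA_field _ hhd]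
        by_cases h3 : k = 3
        · subst h3
          have hcond : ¬ (((3 : Nat) : Int) < 3 ∨ (((3 : Nat) : Int)) = 4) := by omega
          simp only [hcond, if_false, List.nil_append]
          have h4 : ((3 : Nat) : Int) + 1 = ((4 : Nat) : Int) := by norm_num
          rw [h4, ih r hr 4]
          simp
        · have hcond : ((k : Nat) : Int) < 3 ∨ ((k : Nat) : Int) = 4 := by omega
          simp only [hcond, if_true, if_neg h3]
          have h4 : ((k : Nat) : Int) + 1 = ((k + 1 : Nat) : Int) := by push_cast; ring
          rw [h4, ih r hr (k + 1)]
          simp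

-- ===== VERDICT (by name: the statement is the Claim_ definition above) =====
theorem reformat_string_spec : Claim_equal_reformat_string := by
  intro str _
  unfold Spec_reformat_string reformat_string reformat_string_alt
  have h := pvFoldA str.toList 0 []
  simp only [List.nil_append] at h
  rw [h]
  have h2 : pvLoopA str.toList ((0 : Nat) : Int) = pvGoB str.toList 0 :=
    pvMainAux str.toList.length str.toList le_rfl 0
  simp only [Nat.cast_zero] at h2
  rw [h2]
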